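-- pv_equiv track=rewrite | github.com/Gabriel-Kahen/eshkol-jupyter-kernel | src/eshkol_kernel/doctor.py | linux_dependency_hint
-- ===== SOURCE A (Python) =====
-- from collections.abc import Sequence
--
-- def linux_dependency_hint(missing: Sequence[str]) -> str:
--     packages: list[str] = []
--     if any(name.startswith("libblas") for name in missing):
--         packages.append("libblas3")
--     if any(name.startswith("liblapack") for name in missing):
--         packages.append("liblapack3")
--     if any(name.startswith("libLLVM") for name in missing):
--         packages.append("libllvm21 from apt.llvm.org")
--     if not packages:
--         return "Install the missing runtime libraries for your distribution."
--     return "On Ubuntu, install: " + ", ".join(packages) + "."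
-- ===== SOURCE B (Python) =====
-- def linux_dependency_hint(missing):
--     # one pass: record which known prefixes occur, then emit in fixed order
--     has_blas = has_lapack = has_llvm = False
--     for name in missing:
--         has_blas = has_blas or name.startswith("libblas")
--         has_lapack = has_lapack or name.startswith("liblapack")
--         has_llvm = has_llvm or name.startswith("libLLVM")
--     packages = (["libblas3"] if has_blas else []) \
--              + (["liblapack3"] if has_lapack else []) \
--              + (["libllvm21 from apt.llvm.org"] if has_llvm else [])
--     if not packages:
--         return "Install the missing runtime libraries for your distribution."
--     return "On Ubuntu, install: " + ", ".join(packages) + "."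
-- ===== Notes on version B (the rewrite author's own statement) =====
-- stated objective: alternative
-- what changed: Replaces three separate any(...) scans over missing with one loop that records three prefix-match flags, then assembles the package list in the fixed order from those flags.
import Mathlib
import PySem

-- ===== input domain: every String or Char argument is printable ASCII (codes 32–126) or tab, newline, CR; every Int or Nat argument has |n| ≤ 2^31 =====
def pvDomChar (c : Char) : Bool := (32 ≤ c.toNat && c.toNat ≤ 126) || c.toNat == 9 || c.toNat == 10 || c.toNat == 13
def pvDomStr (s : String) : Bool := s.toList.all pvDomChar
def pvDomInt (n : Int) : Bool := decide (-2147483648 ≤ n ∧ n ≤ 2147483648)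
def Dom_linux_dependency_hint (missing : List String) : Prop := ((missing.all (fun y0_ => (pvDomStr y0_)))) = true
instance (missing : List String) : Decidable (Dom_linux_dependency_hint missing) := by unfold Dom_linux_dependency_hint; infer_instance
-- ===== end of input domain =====

-- B replaces A's three separate any(...) scans with a single pass recording three
-- prefix-match flags, then emits the packages in the same fixed order (objective: alternative).

-- ===== PORT A =====
def linux_dependency_hint (missing : List String) : String :=
  let packages : List String := []
  let packages := if missing.any (fun name => PySem.Str.startswith name "libblas") then packages ++ ["libblas3"] else packages
  let packages := if missing.any (fun name => PySem.Str.startswith name "liblapack") then packages ++ ["liblapack3"] else packages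
  let packages := if missing.any (fun name => PySem.Str.startswith name "libLLVM") then packages ++ ["libllvm21 from apt.llvm.org"] else packages
  if packages = [] then "Install the missing runtime libraries for your distribution."
  else "On Ubuntu, install: " ++ PySem.Str.join ", " packages ++ "."

-- ===== PORT B =====
def linux_dependency_hint_alt (missing : List String) : String :=
  let flags := missing.foldl
    (fun (f : Bool × Bool × Bool) name =>
      (f.1 || PySem.Str.startswith name "libblas",
       f.2.1 || PySem.Str.startswith name "liblapack",
       f.2.2 || PySem.Str.startswith name "libLLVM"))
    (false, false, false)
  let packages :=
    (if flags.1 then ["libblas3"] else []) ++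
    (if flags.2.1 then ["liblapack3"] else []) ++
    (if flags.2.2 then ["libllvm21 from apt.llvm.org"] else [])
  if packages.isEmpty then "Install the missing runtime libraries for your distribution."
  else "On Ubuntu, install: " ++ PySem.Str.join ", " packages ++ "."

-- ===== PRECONDITION & SPEC =====
def Spec_linux_dependency_hint (missing : List String) (out : String) : Prop := out = linux_dependency_hint_alt missing
instance (missing : List String) (out : String) : Decidable (Spec_linux_dependency_hint missing out) := by unfold Spec_linux_dependency_hint; infer_instance

-- ===== CLAIM (what is proved, stated in full; the proofs are below) =====
def Claim_equal_linux_dependency_hint : Prop := ∀ (missing : List String), Dom_linux_dependency_hint missing → Spec_linux_dependency_hint missing (linux_dependency_hint missing)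

-- ===== LEMMAS AND PROOFS =====
theorem flags_fold_eq (l : List String) (a b c : Bool) :
    l.foldl
      (fun (f : Bool × Bool × Bool) name =>
        (f.1 || PySem.Str.startswith name "libblas",
         f.2.1 || PySem.Str.startswith name "liblapack",
         f.2.2 || PySem.Str.startswith name "libLLVM")) (a, b, c)
    = (a || l.any (fun name => PySem.Str.startswith name "libblas"),
       b || l.any (fun name => PySem.Str.startswith name "liblapack"),
       c || l.any (fun name => PySem.Str.startswith name "libLLVM")) := by
  induction l generalizing a b c with
  | nil => simp
  | cons x xs ih => rw [List.foldl_cons, ih]; simp [Bool.or_assoc]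

-- ===== VERDICT (by name: the statement is the Claim_ definition above) =====
theorem linux_dependency_hint_spec : Claim_equal_linux_dependency_hint := by
  intro missing _
  unfold Spec_linux_dependency_hint linux_dependency_hint linux_dependency_hint_alt
  rw [flags_fold_eq]
  generalize missing.any (fun name => PySem.Str.startswith name "libblas") = b1
  generalize missing.any (fun name => PySem.Str.startswith name "liblapack") = b2
  generalize missing.any (fun name => PySem.Str.startswith name "libLLVM") = b3
  cases b1 <;> cases b2 <;> cases b3 <;> rfl
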